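-- pv_equiv track=rewrite | github.com/hisorhikaneko92-create/itsai-detection | scripts/evaluate_seam_detector.py | _word_preds_from_path
-- ===== SOURCE A (Python) =====
-- from typing import Dict, List, Optional, Tuple
--
-- def _word_preds_from_path(pred_path: List[int],
--                           word_ids: List[Optional[int]],
--                           n_words: int) -> List[int]:
--     """Map sub-token predictions to word-level via the first-subword rule.
--
--     `pred_path` is the CRF Viterbi output for positions where the mask was
--     True (we keep the attention_mask plus the forced position-0 True).
--     `word_ids` is parallel to the FULL token sequence (length = max_length);
--     None for special tokens, integer-word-index for content tokens."""
--     word_preds: List[Optional[int]] = [None] * n_words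
--     pi = 0
--     for word_idx in word_ids:
--         if pi >= len(pred_path):
--             break
--         if word_idx is None:
--             pi += 1
--             continue
--         if word_preds[word_idx] is None:
--             word_preds[word_idx] = int(pred_path[pi])
--         pi += 1
--     return [0 if p is None else p for p in word_preds]
-- ===== SOURCE B (Python) =====
-- from typing import List, Optional
--
-- def _word_preds_from_path(pred_path: List[int],
--                           word_ids: List[Optional[int]],
--                           n_words: int) -> List[int]:
--     """Reverse pass: walk the (pred, word_id) window back-to-front writing
--     unconditionally, so the earliest sub-token's prediction wins."""
--     word_preds = [0] * n_words
--     for v, w in reversed(list(zip(pred_path, word_ids))):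
--         if w is not None:
--             word_preds[w] = int(v)
--     return word_preds
-- ===== Notes on version B (the rewrite author's own statement) =====
-- stated objective: alternative
-- what changed: Replaces A's forward pass with an Optional sentinel list, a threaded position counter and a write-only-if-unset rule plus a final None->0 map by a single reverse pass over the zipped (prediction, word_id) window that writes unconditionally into a plain int list, so the earliest sub-token's write wins last.
import Mathlib
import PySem

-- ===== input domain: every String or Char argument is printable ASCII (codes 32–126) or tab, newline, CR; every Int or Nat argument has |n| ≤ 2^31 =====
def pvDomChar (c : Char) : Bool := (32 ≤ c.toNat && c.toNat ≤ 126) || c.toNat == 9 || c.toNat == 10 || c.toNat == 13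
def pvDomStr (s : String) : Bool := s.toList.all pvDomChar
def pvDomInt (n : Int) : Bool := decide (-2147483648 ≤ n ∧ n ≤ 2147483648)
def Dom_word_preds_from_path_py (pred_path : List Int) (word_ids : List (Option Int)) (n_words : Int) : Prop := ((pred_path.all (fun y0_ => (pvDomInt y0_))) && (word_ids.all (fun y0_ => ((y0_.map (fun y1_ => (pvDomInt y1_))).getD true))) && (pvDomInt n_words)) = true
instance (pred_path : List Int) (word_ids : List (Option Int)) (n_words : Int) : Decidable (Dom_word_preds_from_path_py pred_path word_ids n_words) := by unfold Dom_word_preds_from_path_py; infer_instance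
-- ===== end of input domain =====

-- B replaces A's forward sentinel-and-counter pass by one reverse pass over the zipped
-- window writing unconditionally (alternative decomposition, same cost).

-- ===== PORT A =====
-- A's loop: walk word_ids with the position counter pi; first-subword rule into an
-- Optional list (None = unset).  `pyGet? wp w = none` is exactly Python's IndexError
-- on `word_preds[word_idx]` (excluded by Pre_); pi is Python's pi (always ≥ 0).
def wppLoopA (pred_path : List Int) : List (Option Int) → Nat → List (Option Int) → List (Option Int)
  | [], _, wp => wp
  | wid :: rest, pi, wp =>
    if pred_path.length ≤ pi then wp
    else
      match wid with
      | none => wppLoopA pred_path rest (pi + 1) wp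
      | some w =>
        match PySem.List.pyGet? wp w with
        | none => wp  -- Python raises IndexError here; outside Pre_
        | some cur =>
          wppLoopA pred_path rest (pi + 1)
            (if cur = none then PySem.List.pySetD wp w (some (pred_path.getD pi 0)) else wp)

def word_preds_from_path_py (pred_path : List Int) (word_ids : List (Option Int)) (n_words : Int) : List Int :=
  (wppLoopA pred_path word_ids 0 (List.replicate n_words.toNat none)).map (fun p => p.getD 0)

-- ===== PORT B =====
-- B's loop: the reversed zipped window, each non-None word id written unconditionally.
-- `pySet? wp wi v = none` is exactly Python's IndexError on the assignment (outside Pre_).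
def wppLoopB : List (Int × Option Int) → List Int → List Int
  | [], wp => wp
  | (v, w) :: rest, wp =>
    match w with
    | none => wppLoopB rest wp
    | some wi =>
      match PySem.List.pySet? wp wi v with
      | none => wp  -- Python raises IndexError here; outside Pre_
      | some wp' => wppLoopB rest wp'

def word_preds_from_path_py_alt (pred_path : List Int) (word_ids : List (Option Int)) (n_words : Int) : List Int :=
  wppLoopB ((pred_path.zip word_ids).reverse) (List.replicate n_words.toNat 0)

-- ===== PRECONDITION & SPEC =====
-- Pre_ excludes exactly the inputs on which A raises IndexError: a non-None word index
-- inside the pred_path window that is out of range for the n_words list.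
def Pre_word_preds_from_path_py (pred_path : List Int) (word_ids : List (Option Int)) (n_words : Int) : Prop :=
  ∀ p ∈ pred_path.zip word_ids, ∀ w ∈ p.2, PySem.Raise.InRange n_words.toNat w
instance (pred_path : List Int) (word_ids : List (Option Int)) (n_words : Int) : Decidable (Pre_word_preds_from_path_py pred_path word_ids n_words) := by unfold Pre_word_preds_from_path_py; infer_instance

def pvWitness_word_preds_from_path_py : List Int × List (Option Int) × Int :=
  ([1, 0, 1], [some 0, none, some 1, some 1], 3)

def Spec_word_preds_from_path_py (pred_path : List Int) (word_ids : List (Option Int)) (n_words : Int) (out : List Int) : Prop := out = word_preds_from_path_py_alt pred_path word_ids n_words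
instance (pred_path : List Int) (word_ids : List (Option Int)) (n_words : Int) (out : List Int) : Decidable (Spec_word_preds_from_path_py pred_path word_ids n_words out) := by unfold Spec_word_preds_from_path_py; infer_instance

-- ===== CLAIM (what is proved, stated in full; the proofs are below) =====
def Claim_equal_word_preds_from_path_py : Prop := ∀ (pred_path : List Int) (word_ids : List (Option Int)) (n_words : Int), Dom_word_preds_from_path_py pred_path word_ids n_words → Pre_word_preds_from_path_py pred_path word_ids n_words → Spec_word_preds_from_path_py pred_path word_ids n_words (word_preds_from_path_py pred_path word_ids n_words)

-- ===== LEMMAS AND PROOFS =====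

/-- The match predicate: pair p writes into slot s of a length-n list. -/
def wppHits (n s : Nat) (p : Int × Option Int) : Bool :=
  match p.2 with
  | none => false
  | some w => PySem.List.pyIdx? n w == some s

lemma pyIdx?_lt {n : Nat} {w : Int} {k : Nat} (h : PySem.List.pyIdx? n w = some k) : k < n := by
  simp only [PySem.List.pyIdx?] at h
  split_ifs at h with h1 h2 h3 <;> simp_all <;> omega

lemma pyIdx?_isSome_of_inRange {n : Nat} {w : Int} (h : PySem.Raise.InRange n w) :
    (PySem.List.pyIdx? n w).isSome := by
  obtain ⟨h1, h2⟩ := h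
  simp only [PySem.List.pyIdx?]
  split_ifs <;> simp_all

lemma loopB_get (M : List (Int × Option Int)) (wp : List Int) (s : Nat)
    (hin : ∀ p ∈ M, ∀ w ∈ p.2, (PySem.List.pyIdx? wp.length w).isSome) :
    (wppLoopB M wp)[s]? =
      match M.reverse.find? (wppHits wp.length s) with
      | some p => some p.1
      | none => wp[s]? := by
  induction M generalizing wp with
  | nil => simp [wppLoopB]
  | cons hd tl ih =>
    obtain ⟨v, w⟩ := hd
    match w with
    | none =>
      have := ih wp (fun p hp => hin p (List.mem_cons_of_mem _ hp))
      simp only [wppLoopB, List.reverse_cons, List.find?_append, this]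
      cases tl.reverse.find? (wppHits wp.length s) <;> simp [wppHits]
    | some wi =>
      have hs : (PySem.List.pyIdx? wp.length wi).isSome := by
        exact hin (v, some wi) (List.mem_cons_self) wi rfl
      obtain ⟨k, hk⟩ := Option.isSome_iff_exists.mp hs
      have hklt : k < wp.length := pyIdx?_lt hk
      have hset : PySem.List.pySet? wp wi v = some (wp.set k v) := by
        simp [PySem.List.pySet?, hk]
      have hlen : (wp.set k v).length = wp.length := by simp
      have := ih (wp.set k v) (by rw [hlen]; exact fun p hp => hin p (List.mem_cons_of_mem _ hp))
      simp only [wppLoopB, hset, this, hlen, List.reverse_cons, List.find?_append]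
      cases hfind : tl.reverse.find? (wppHits wp.length s) with
      | some p => simp
      | none =>
        simp only [Option.none_or]
        by_cases hsk : k = s
        · subst hsk
          simp [wppHits, hk, hklt]
        · have : wppHits wp.length s (v, some wi) = false := by
            simp [wppHits, hk]; omega
          simp [this, List.getElem?_set_ne (by omega : k ≠ s)]

/-- A's loop over word_ids with counter pi is the structural loop over the zipped window. -/
def wppLoopA2 : List (Int × Option Int) → List (Option Int) → List (Option Int)
  | [], wp => wp
  | (v, w) :: rest, wp =>
    match w with
    | none => wppLoopA2 rest wp
    | some wi =>
      match PySem.List.pyGet? wp wi with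
      | none => wp
      | some cur =>
        wppLoopA2 rest (if cur = none then PySem.List.pySetD wp wi (some v) else wp)

lemma loopA_eq_A2 (ids : List (Option Int)) (pred : List Int) (pi : Nat) (wp : List (Option Int)) :
    wppLoopA pred ids pi wp = wppLoopA2 ((pred.drop pi).zip ids) wp := by
  induction ids generalizing pi wp with
  | nil => simp [wppLoopA, wppLoopA2]
  | cons wid rest ih =>
    by_cases h : pred.length ≤ pi
    · rw [List.drop_of_length_le h]
      simp [wppLoopA, wppLoopA2, h]
    · have hlt : pi < pred.length := by omega
      rw [List.drop_eq_getElem_cons hlt, List.zip_cons_cons]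
      have hget : pred.getD pi 0 = pred[pi] := List.getD_eq_getElem pred 0 hlt
      match wid with
      | none =>
        simp only [wppLoopA, wppLoopA2]
        rw [if_neg h]
        exact ih (pi + 1) wp
      | some w =>
        simp only [wppLoopA, wppLoopA2, hget]
        rw [if_neg h]
        cases PySem.List.pyGet? wp w with
        | none => rfl
        | some cur => exact ih (pi + 1) _

lemma loopA2_get (L : List (Int × Option Int)) (wp : List (Option Int)) (s : Nat)
    (hin : ∀ p ∈ L, ∀ w ∈ p.2, (PySem.List.pyIdx? wp.length w).isSome) :
    (wppLoopA2 L wp)[s]? =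
      wp[s]?.map (fun cur =>
        match cur with
        | some x => some x
        | none => Option.map Prod.fst (L.find? (wppHits wp.length s))) := by
  induction L generalizing wp with
  | nil =>
    cases h : wp[s]? with
    | none => simp [wppLoopA2, h]
    | some cur => cases cur <;> simp [wppLoopA2, h]
  | cons hd tl ih =>
    obtain ⟨v, w⟩ := hd
    match w with
    | none =>
      have := ih wp (fun p hp => hin p (List.mem_cons_of_mem _ hp))
      simp only [wppLoopA2, this, List.find?_cons, wppHits]
    | some wi =>
      have hs : (PySem.List.pyIdx? wp.length wi).isSome :=
        hin (v, some wi) (List.mem_cons_self) wi rfl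
      obtain ⟨k, hk⟩ := Option.isSome_iff_exists.mp hs
      have hklt : k < wp.length := pyIdx?_lt hk
      have hgetk : PySem.List.pyGet? wp wi = some wp[k] := by
        simp [PySem.List.pyGet?, hk, List.getElem?_eq_getElem hklt]
      by_cases hcur : wp[k] = none
      · -- first write into slot k
        have hsetD : PySem.List.pySetD wp wi (some v) = wp.set k (some v) := by
          simp [PySem.List.pySetD, PySem.List.pySet?, hk]
        have hlen : (wp.set k (some v)).length = wp.length := by simp
        have := ih (wp.set k (some v))
          (by rw [hlen]; exact fun p hp => hin p (List.mem_cons_of_mem _ hp))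
        simp only [wppLoopA2, hgetk]
        rw [if_pos hcur, hsetD, this, hlen]
        by_cases hsk : k = s
        · subst hsk
          have hw : wppHits wp.length k (v, some wi) = true := by simp [wppHits, hk]
          rw [List.getElem?_set_self hklt, List.getElem?_eq_getElem hklt, hcur,
            List.find?_cons_of_pos hw]
          simp
        · have hw : wppHits wp.length s (v, some wi) = false := by
            simp [wppHits, hk]; omega
          rw [List.getElem?_set_ne (by omega : k ≠ s), List.find?_cons_of_neg (by simp [hw])]
      · -- slot k already set: no write
        have := ih wp (fun p hp => hin p (List.mem_cons_of_mem _ hp))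
        simp only [wppLoopA2, hgetk, if_neg hcur, this]
        by_cases hsk : k = s
        · subst hsk
          rw [List.getElem?_eq_getElem hklt]
          obtain ⟨x, hx⟩ := Option.ne_none_iff_exists'.mp hcur
          simp [hx]
        · have hw : wppHits wp.length s (v, some wi) = false := by
            simp [wppHits, hk]; omega
          rw [List.find?_cons_of_neg (by simp [hw])]

-- ===== VERDICT (by name: the statement is the Claim_ definition above) =====
theorem word_preds_from_path_py_spec : Claim_equal_word_preds_from_path_py := by
  intro pred ids n _hdom hpre
  unfold Spec_word_preds_from_path_py word_preds_from_path_py word_preds_from_path_py_alt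
  set N := n.toNat with hN
  have hin : ∀ p ∈ pred.zip ids, ∀ w ∈ p.2, (PySem.List.pyIdx? N w).isSome :=
    fun p hp w hw => pyIdx?_isSome_of_inRange (hpre p hp w hw)
  rw [loopA_eq_A2, List.drop_zero]
  apply List.ext_getElem?
  intro s
  have hlenA : (List.replicate N (none : Option Int)).length = N := by simp
  have hlenB : (List.replicate N (0 : Int)).length = N := by simp
  rw [List.getElem?_map, loopA2_get _ _ s (by rw [hlenA]; exact hin),
    loopB_get _ _ s (by rw [hlenB]; exact fun p hp w hw => hin p (List.mem_reverse.mp hp) w hw),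
    hlenA, hlenB, List.reverse_reverse]
  by_cases hsN : s < N
  · rw [List.getElem?_replicate_of_lt hsN, List.getElem?_replicate_of_lt hsN]
    cases hf : (pred.zip ids).find? (wppHits N s) with
    | none => simp
    | some p => simp
  · rw [List.getElem?_eq_none (by simpa using hsN), List.getElem?_eq_none (by simpa using hsN)]
    have hf : (pred.zip ids).find? (wppHits N s) = none := by
      rw [List.find?_eq_none]
      intro p hp
      match p, hp with
      | (v, none), hp => simp [wppHits]
      | (v, some w), hp =>
        have := pyIdx?_isSome_of_inRange (hpre (v, some w) hp w rfl)
        obtain ⟨k, hk⟩ := Option.isSome_iff_exists.mp this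
        have hklt := pyIdx?_lt hk
        have hks : k ≠ s := by omega
        simp [wppHits, hN, hk, hks]
    simp [hf]
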